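-- pv_equiv track=rewrite | github.com/abulte/ecospheres-org-ref | extract.py | find_top_level_parent_by_id
-- ===== SOURCE A (Python) =====
-- ID_MTE = "05f90b6a-e3d9-4a41-a919-2e2f2d77e517"
--
-- ID_GVT = "622a21da-ff27-4f5a-ae74-133aa03d905f"
--
-- def find_top_level_parent_by_id(_id: str, graph: dict):
--     # sanity check, only one parent by id in "Service Fils" graph
--     parents = [node for node, children in graph.items() if _id in children]
--     assert len(parents) <= 1, "Multiple parents detected"
--
--     parent = next(iter(parents), None)
--     # no more parent, top level found
--     if parent is None or parent == ID_GVT or parent == ID_MTE: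
--         return _id
--     else:
--         return find_top_level_parent_by_id(parent, graph)
-- ===== SOURCE B (Python) =====
-- ID_MTE = "05f90b6a-e3d9-4a41-a919-2e2f2d77e517"
--
-- ID_GVT = "622a21da-ff27-4f5a-ae74-133aa03d905f"
--
-- def find_top_level_parent_by_id(_id: str, graph: dict):
--     # index every child -> list of its parents once, then walk the chain iteratively
--     parent_lists = {}
--     for child, node in ((child, node) for node, children in graph.items()
--                        for child in dict.fromkeys(children)):
--         parent_lists.setdefault(child, []).append(node)
--     current = _id
--     while True:
--         parents = parent_lists.get(current, [])
--         assert len(parents) <= 1, "Multiple parents detected"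
--         parent = parents[0] if parents else None
--         if parent is None or parent == ID_GVT or parent == ID_MTE:
--             return current
--         current = parent
-- ===== Notes on version B (the rewrite author's own statement) =====
-- stated objective: alternative
-- what changed: Replaces A's recursive walk that rescans the whole graph at every level with a child-to-parents index built in one pass followed by an iterative while-loop walk doing O(1)-lookup steps.
import Mathlib
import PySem

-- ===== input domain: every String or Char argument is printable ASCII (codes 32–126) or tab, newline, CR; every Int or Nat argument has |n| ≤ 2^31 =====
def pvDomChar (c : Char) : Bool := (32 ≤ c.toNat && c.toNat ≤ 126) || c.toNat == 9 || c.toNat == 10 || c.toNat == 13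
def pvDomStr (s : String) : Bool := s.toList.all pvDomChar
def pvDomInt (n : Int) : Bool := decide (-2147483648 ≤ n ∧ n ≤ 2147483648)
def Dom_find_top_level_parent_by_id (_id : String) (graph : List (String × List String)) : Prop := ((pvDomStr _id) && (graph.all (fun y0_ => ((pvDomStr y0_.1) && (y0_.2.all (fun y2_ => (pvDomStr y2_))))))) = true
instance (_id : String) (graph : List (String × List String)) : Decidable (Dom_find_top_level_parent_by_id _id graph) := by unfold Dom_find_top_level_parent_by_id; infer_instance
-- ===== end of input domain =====

-- B replaces A's per-level full scan + recursion by a child→parents index built once plus an iterative walk (alternative decomposition).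
-- Python A raises AssertionError on a visited node with two parents and hits the recursion limit on a parent cycle; Pre_ excludes exactly those inputs.

def ID_MTE : String := "05f90b6a-e3d9-4a41-a919-2e2f2d77e517"

def ID_GVT : String := "622a21da-ff27-4f5a-ae74-133aa03d905f"

-- ===== PORT A =====
-- A's recursion, with fuel graph.length + 1 (under Pre_ the chain visits distinct keys, so the fuel is never exhausted)
def pvGoA (graph : List (String × List String)) : Nat → String → String
  | 0, i => i
  | f + 1, i =>
    -- parents = [node for node, children in graph.items() if _id in children]
    let parents := (graph.filter (fun p => decide (i ∈ p.2))).map Prod.fst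
    -- parent = next(iter(parents), None)  (the assert raises only outside Pre_)
    match parents.head? with
    | none => i
    | some parent =>
      if parent = ID_GVT ∨ parent = ID_MTE then i else pvGoA graph f parent

def find_top_level_parent_by_id (_id : String) (graph : List (String × List String)) : String :=
  pvGoA graph (graph.length + 1) _id

-- ===== PORT B =====
-- edges generator: (child, node) for node, children in graph for child in dict.fromkeys(children)
def pvEdges (graph : List (String × List String)) : List (String × String) :=
  graph.flatMap (fun p => (PySem.List.dedup p.2).map (fun c => (c, p.1)))

-- parent_lists: setdefault(child, []).append(node)
def pvParentLists (graph : List (String × List String)) : PySem.Dict String (List String) :=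
  (pvEdges graph).foldl (fun d e => d.modify e.1 [] (· ++ [e.2])) PySem.Dict.empty

-- the while-True walk, same fuel
def pvGoB (pmap : PySem.Dict String (List String)) : Nat → String → String
  | 0, cur => cur
  | f + 1, cur =>
    let parents := pmap.getD cur []
    match parents.head? with
    | none => cur
    | some parent =>
      if parent = ID_GVT ∨ parent = ID_MTE then cur else pvGoB pmap f parent

def find_top_level_parent_by_id_alt (_id : String) (graph : List (String × List String)) : String :=
  pvGoB (pvParentLists graph) (graph.length + 1) _id

-- ===== PRECONDITION & SPEC =====
-- helpers for Pre_ (independent of the ports): number of parents of s, first parent, the chain A visits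
def pvNumParents (s : String) (graph : List (String × List String)) : Nat :=
  (graph.filter (fun p => decide (s ∈ p.2))).length

def pvFirstParent (s : String) (graph : List (String × List String)) : Option String :=
  ((graph.filter (fun p => decide (s ∈ p.2))).map Prod.fst).head?

def pvChain (graph : List (String × List String)) : Nat → String → List String
  | 0, _ => []
  | f + 1, s =>
    match pvFirstParent s graph with
    | none => []
    | some p => if p = ID_GVT ∨ p = ID_MTE then [] else p :: pvChain graph f p

-- Pre_: the nodes A visits are pairwise distinct (no parent cycle, so the recursion terminates)
-- and each visited node has at most one parent (A's assert passes); exactly where Python A returns normally.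
def Pre_find_top_level_parent_by_id (_id : String) (graph : List (String × List String)) : Prop :=
  (_id :: pvChain graph (graph.length + 1) _id).Nodup ∧
  ∀ s ∈ _id :: pvChain graph (graph.length + 1) _id, pvNumParents s graph ≤ 1

instance (_id : String) (graph : List (String × List String)) : Decidable (Pre_find_top_level_parent_by_id _id graph) := by
  unfold Pre_find_top_level_parent_by_id; infer_instance

def pvWitness_find_top_level_parent_by_id : String × (List (String × List String)) :=
  ("a", [("b", ["a"]), ("c", ["b"])])

def Spec_find_top_level_parent_by_id (_id : String) (graph : List (String × List String)) (out : String) : Prop := out = find_top_level_parent_by_id_alt _id graph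
instance (_id : String) (graph : List (String × List String)) (out : String) : Decidable (Spec_find_top_level_parent_by_id _id graph out) := by unfold Spec_find_top_level_parent_by_id; infer_instance

-- ===== CLAIM (what is proved, stated in full; the proofs are below) =====
def Claim_equal_find_top_level_parent_by_id : Prop := ∀ (_id : String) (graph : List (String × List String)), Dom_find_top_level_parent_by_id _id graph → Pre_find_top_level_parent_by_id _id graph → Spec_find_top_level_parent_by_id _id graph (find_top_level_parent_by_id _id graph)

-- ===== LEMMAS AND PROOFS =====
-- a Nodup list filtered by equality with c is [c] or []
lemma filter_beq_of_nodup (l : List String) (c : String) (h : l.Nodup) :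
    l.filter (fun x => x == c) = if c ∈ l then [c] else [] := by
  induction l with
  | nil => simp
  | cons a l ih =>
    simp only [List.nodup_cons] at h
    by_cases hac : a = c
    · subst hac
      simp [h.1, ih h.2]
    · simp only [List.filter_cons, List.mem_cons]
      rw [ih h.2]
      simp [hac, Ne.symm hac]

-- the index lists exactly the parents A's per-level scan finds, in the same order
lemma parentLists_getD (graph : List (String × List String)) (c : String) :
    (pvParentLists graph).getD c [] = (graph.filter (fun p => decide (c ∈ p.2))).map Prod.fst := by
  unfold pvParentLists
  rw [PySem.Dict.getD_foldl_modify_append]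
  simp only [PySem.Dict.getD_empty, List.nil_append]
  unfold pvEdges
  induction graph with
  | nil => simp
  | cons p g ih =>
    simp only [List.flatMap_cons, List.filter_append, List.map_append, ih]
    rw [List.filter_map]
    rw [show ((fun e : String × String => e.1 == c) ∘ fun c' => (c', p.1)) = fun c' => c' == c from rfl]
    rw [filter_beq_of_nodup _ _ (PySem.List.nodup_dedup p.2)]
    by_cases hc : c ∈ p.2
    · simp [hc]
    · simp [hc]

-- with the index in hand, the two walks are step-for-step identical
lemma go_eq (graph : List (String × List String)) :
    ∀ (f : Nat) (i : String), pvGoA graph f i = pvGoB (pvParentLists graph) f i := by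
  intro f
  induction f with
  | zero => intro i; rfl
  | succ f ih =>
    intro i
    simp only [pvGoA, pvGoB, parentLists_getD]
    cases h : ((graph.filter (fun p => decide (i ∈ p.2))).map Prod.fst).head? with
    | none => rfl
    | some parent =>
      by_cases hp : parent = ID_GVT ∨ parent = ID_MTE
      · simp [hp]
      · simp [hp, ih]

-- ===== VERDICT (by name: the statement is the Claim_ definition above) =====
theorem find_top_level_parent_by_id_spec : Claim_equal_find_top_level_parent_by_id := by
  intro _id graph _ _
  unfold Spec_find_top_level_parent_by_id find_top_level_parent_by_id find_top_level_parent_by_id_alt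
  exact go_eq graph (graph.length + 1) _id
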